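-- pv_equiv track=rewrite | github.com/samrroyall/info.rm | src/query.py | grab_columns
-- ===== SOURCE A (Python) =====
-- from typing import List, Tuple, Optional, Dict, Any
--
-- def check_col(col: str) -> bool:
--     if "." not in col:
--         return False
--     else:
--         table = col.split(".")[0]
--         col = col.split(".")[1]
--         if table.isdecimal() and col.isdecimal():
--             return False
--     return True
--
-- def grab_columns(string: str) -> List[str]:
--     chars = ['/','*','+','-','(',')',' ']
--     result = []
--     temp_col = ""
--     for char in string:
--         if char not in chars:
--             temp_col += char
--         else:
--             if temp_col != "":
--                 if check_col(temp_col):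
--                     result.append(temp_col)
--                 temp_col = ""
--     if temp_col != "":
--         if check_col(temp_col):
--             result.append(temp_col)
--     return result
-- ===== SOURCE B (Python) =====
-- from typing import List
--
-- def check_col(col: str) -> bool:
--     if "." not in col:
--         return False
--     else:
--         table = col.split(".")[0]
--         col = col.split(".")[1]
--         if table.isdecimal() and col.isdecimal():
--             return False
--     return True
--
-- DELIMS = '/*+-() '
--
-- def grab_columns(string: str) -> List[str]:
--     result = []
--     i, n = 0, len(string)
--     while i < n:
--         if string[i] in DELIMS:
--             i += 1
--             continue
--         j = i
--         while j < n and string[j] not in DELIMS: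
--             j += 1
--         tok = string[i:j]
--         if check_col(tok):
--             result.append(tok)
--         i = j
--     return result
-- ===== Notes on version B (the rewrite author's own statement) =====
-- stated objective: alternative
-- what changed: Replaces A's stateful character-accumulator with trailing flush by an index/slice scanner that skips delimiters and cuts each maximal non-delimiter token out in one slice, then filters with the unchanged check_col.
import Mathlib
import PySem

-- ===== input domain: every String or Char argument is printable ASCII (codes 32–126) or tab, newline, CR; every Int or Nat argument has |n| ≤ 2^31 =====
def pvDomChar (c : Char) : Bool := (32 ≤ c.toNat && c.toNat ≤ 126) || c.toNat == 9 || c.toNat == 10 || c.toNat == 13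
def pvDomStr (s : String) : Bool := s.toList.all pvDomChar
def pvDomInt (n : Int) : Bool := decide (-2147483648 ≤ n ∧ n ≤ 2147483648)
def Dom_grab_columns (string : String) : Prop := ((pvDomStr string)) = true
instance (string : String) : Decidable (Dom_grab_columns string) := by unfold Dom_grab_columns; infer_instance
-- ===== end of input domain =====

-- B replaces A's stateful char-accumulator-with-flush by an index/slice scanner that skips
-- delimiters and cuts each maximal token out whole (objective: alternative; same O(n) cost).

-- ===== PORT A =====
-- shared helper of A and B (B reuses check_col unchanged).
-- .isdecimal() is ported as PySem.Str.strIsdigit: they coincide on the ASCII domain.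
def check_col (col : String) : Bool :=
  if !(PySem.Str.isIn "." col) then false
  else
    let parts := (PySem.Str.split? col ".").getD []        -- sep "." ≠ "" so split? is some
    let table := (PySem.List.pyGet? parts 0).getD ""        -- indices 0,1 in range: "." ∈ col
    let c := (PySem.List.pyGet? parts 1).getD ""            -- gives ≥ 2 parts
    if PySem.Str.strIsdigit table && PySem.Str.strIsdigit c then false else true

def pyDelims : List Char := ['/','*','+','-','(',')',' ']

def stepA (st : List String × List Char) (c : Char) : List String × List Char :=
  if c ∉ pyDelims then (st.1, st.2 ++ [c])
  else if st.2 ≠ [] then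
    (if check_col (String.ofList st.2) then st.1 ++ [String.ofList st.2] else st.1, [])
  else (st.1, [])

def finishA (st : List String × List Char) : List String :=
  if st.2 ≠ [] then
    if check_col (String.ofList st.2) then st.1 ++ [String.ofList st.2] else st.1
  else st.1

def grab_columns (string : String) : List String :=
  finishA (string.toList.foldl stepA ([], []))

-- ===== PORT B =====
def notDelim (c : Char) : Bool := !(c ∈ "/*+-() ".toList)

def grab_columns_core : List Char → List String
  | [] => []
  | c :: cs =>
    if notDelim c then
      let tok := String.ofList (c :: cs.takeWhile notDelim)     -- tok = string[i:j]
      (if check_col tok then [tok] else []) ++ grab_columns_core (cs.dropWhile notDelim)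
    else grab_columns_core cs
  termination_by l => l.length
  decreasing_by
    · simpa using Nat.lt_succ_of_le (List.length_dropWhile_le notDelim cs)
    · simp

def grab_columns_alt (string : String) : List String := grab_columns_core string.toList

-- ===== PRECONDITION & SPEC =====
def Spec_grab_columns (string : String) (out : List String) : Prop := out = grab_columns_alt string
instance (string : String) (out : List String) : Decidable (Spec_grab_columns string out) := by unfold Spec_grab_columns; infer_instance

-- ===== CLAIM (what is proved, stated in full; the proofs are below) =====
def Claim_equal_grab_columns : Prop := ∀ (string : String), Dom_grab_columns string → Spec_grab_columns string (grab_columns string)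

-- ===== LEMMAS AND PROOFS =====

lemma delims_toList : "/*+-() ".toList = ['/','*','+','-','(',')',' '] := by decide

-- the two delimiter tests agree
lemma notDelim_eq (c : Char) : notDelim c = !decide (c ∈ pyDelims) := by
  simp only [notDelim, delims_toList, pyDelims]
  by_cases h : c ∈ ['/', '*', '+', '-', '(', ')', ' '] <;> simp_all

-- emitting a finished (delimiter-free, possibly empty) token
def emitTok (temp : List Char) : List String :=
  if temp ≠ [] then
    if check_col (String.ofList temp) then [String.ofList temp] else []
  else []

lemma core_emit (temp : List Char) (c : Char) (cs : List Char)
    (ht : ∀ x ∈ temp, notDelim x = true) (hc : notDelim c = false) :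
    grab_columns_core (temp ++ c :: cs) = emitTok temp ++ grab_columns_core cs := by
  cases temp with
  | nil => simp [emitTok, grab_columns_core, hc]
  | cons t ts =>
    have htt : notDelim t = true := ht t (by simp)
    have hts : ∀ x ∈ ts, notDelim x = true := fun x hx => ht x (by simp [hx])
    have htake : List.takeWhile notDelim (ts ++ c :: cs) = ts := by
      rw [List.takeWhile_append_of_pos hts]
      simp [List.takeWhile, hc]
    have hdrop : List.dropWhile notDelim (ts ++ c :: cs) = c :: cs := by
      rw [List.dropWhile_append_of_pos hts]
      simp [List.dropWhile, hc]
    rw [show ((t :: ts) ++ c :: cs) = t :: (ts ++ c :: cs) from rfl, grab_columns_core,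
        if_pos htt, htake, hdrop, grab_columns_core, if_neg (by simp [hc]), emitTok]
    simp

lemma fold_core (cs : List Char) : ∀ (res : List String) (temp : List Char),
    (∀ x ∈ temp, notDelim x = true) →
    finishA (cs.foldl stepA (res, temp)) = res ++ grab_columns_core (temp ++ cs) := by
  induction cs with
  | nil =>
    intro res temp ht
    cases temp with
    | nil => simp [finishA, grab_columns_core]
    | cons t ts =>
      have htt : notDelim t = true := ht t (by simp)
      have hts : ∀ x ∈ ts, notDelim x = true := fun x hx => ht x (by simp [hx])
      have htake : List.takeWhile notDelim ts = ts := List.takeWhile_eq_self_iff.mpr hts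
      have hdrop : List.dropWhile notDelim ts = [] := List.dropWhile_eq_nil_iff.mpr (fun x hx => hts x hx)
      simp only [List.foldl_nil, List.append_nil, finishA, grab_columns_core, htt, htake, hdrop,
        if_pos htt]
      split
      · split <;> simp
      · simp_all
  | cons c cs ih =>
    intro res temp ht
    by_cases hmem : c ∈ pyDelims
    · have hc : notDelim c = false := by rw [notDelim_eq]; simpa using hmem
      have hstep : stepA (res, temp) c =
          ((if temp ≠ [] then
              (if check_col (String.ofList temp) then res ++ [String.ofList temp] else res)
            else res), []) := by
        unfold stepA
        rw [if_neg (not_not_intro hmem)]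
        split <;> simp
      rw [List.foldl_cons, hstep, ih _ [] (by simp), core_emit temp c cs ht hc]
      cases temp with
      | nil => simp [emitTok]
      | cons t ts =>
        simp only [ne_eq, reduceCtorEq, not_false_eq_true, if_pos, List.nil_append, emitTok]
        split <;> simp
    · have hc : notDelim c = true := by rw [notDelim_eq]; simpa using hmem
      have hstep : stepA (res, temp) c = (res, temp ++ [c]) := by
        unfold stepA
        rw [if_pos hmem]
      rw [List.foldl_cons, hstep, ih res (temp ++ [c]) (by
        intro x hx
        rcases List.mem_append.mp hx with h | h
        · exact ht x h
        · simp at h; subst h; exact hc)]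
      simp

-- ===== VERDICT (by name: the statement is the Claim_ definition above) =====
theorem grab_columns_spec : Claim_equal_grab_columns := by
  intro string _
  show grab_columns string = grab_columns_alt string
  unfold grab_columns grab_columns_alt
  simpa using fold_core string.toList [] [] (by simp)
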